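-- pv_equiv track=rewrite | github.com/CHOSIYEON/coding-test-python | 프로그래머스/자료 구조/스택과 큐/주식가격.py | solution
-- ===== SOURCE A (Python) =====
-- def solution(prices):
--     stack = []
--     answer = [0] * len(prices)
--
--     for i in range(len(prices)):
--         while stack and prices[stack[-1]] > prices[i]:
--             past = stack.pop()
--             answer[past] = i - past
--         stack.append(i)
--
--     for i in stack:
--         answer[i] = len(prices) - 1 - i
--
--     return answer
-- ===== SOURCE B (Python) =====
-- def solution(prices):
--     n = len(prices)
--     answer = [0] * n
--     for i in range(n):
--         for j in range(i + 1, n):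
--             answer[i] += 1
--             if prices[j] < prices[i]:
--                 break
--     return answer
-- ===== Notes on version B (the rewrite author's own statement) =====
-- stated objective: alternative
-- what changed: Replaced the monotonic-stack single pass (pop indices whose price exceeds the current one, flush the stack at the end) with naive nested forward scans: for each index count one step per following day and stop at the first strictly smaller price.
import Mathlib
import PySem

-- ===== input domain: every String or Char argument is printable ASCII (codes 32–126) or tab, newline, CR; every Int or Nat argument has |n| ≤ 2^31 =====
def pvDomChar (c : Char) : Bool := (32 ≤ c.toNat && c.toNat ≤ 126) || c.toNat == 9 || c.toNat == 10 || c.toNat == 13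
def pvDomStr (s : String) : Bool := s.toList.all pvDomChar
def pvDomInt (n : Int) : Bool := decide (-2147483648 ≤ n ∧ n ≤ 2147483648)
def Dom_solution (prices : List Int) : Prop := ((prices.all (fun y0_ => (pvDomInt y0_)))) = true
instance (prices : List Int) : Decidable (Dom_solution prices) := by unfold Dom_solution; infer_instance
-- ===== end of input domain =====

-- B replaces A's monotonic-stack single pass by naive nested forward scans
-- (count steps until the first strictly smaller price); alternative algorithm, not faster.

-- ===== PORT A =====
-- stack is represented head = top (Python append/pop act on the right end);
-- all indexing is in range, so List.getD transcribes prices[...] / answer[...] exactly.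
def pvPopPhase (prices : List Int) (i : Nat) : List Nat → List Int → List Nat × List Int
  | [], answer => ([], answer)
  | past :: rest, answer =>
    if prices.getD past 0 > prices.getD i 0 then
      pvPopPhase prices i rest (answer.set past ((i : Int) - (past : Int)))
    else (past :: rest, answer)

def solution (prices : List Int) : List Int :=
  let s := (List.range prices.length).foldl
    (fun s i =>
      let r := pvPopPhase prices i s.1 s.2
      (i :: r.1, r.2))
    ([], List.replicate prices.length (0 : Int))
  -- 'for i in stack' iterates bottom-to-top = our list reversed
  s.1.reverse.foldl (fun ans k => ans.set k ((prices.length : Int) - 1 - (k : Int))) s.2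

-- ===== PORT B =====
-- inner loop 'for j in range(i+1, n): answer[i] += 1; if prices[j] < prices[i]: break'
def pvCnt (p : Int) : List Int → Int
  | [] => 0
  | q :: rest => if q < p then 1 else 1 + pvCnt p rest

def solution_alt (prices : List Int) : List Int :=
  (List.range prices.length).map (fun i => pvCnt (prices.getD i 0) (prices.drop (i + 1)))

-- ===== PRECONDITION & SPEC =====
def Spec_solution (prices : List Int) (out : List Int) : Prop := out = solution_alt prices
instance (prices : List Int) (out : List Int) : Decidable (Spec_solution prices out) := by unfold Spec_solution; infer_instance

-- ===== CLAIM (what is proved, stated in full; the proofs are below) =====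
def Claim_equal_solution : Prop := ∀ (prices : List Int), Dom_solution prices → Spec_solution prices (solution prices)

-- ===== LEMMAS AND PROOFS =====

-- answer[k] already holds its final value: j is the first index after k whose price drops
def pvDone (prices : List Int) (ans : List Int) (m k : Nat) : Prop :=
  ∃ j : Nat, k < j ∧ j < m ∧ prices.getD j 0 < prices.getD k 0 ∧
    (∀ j', k < j' → j' < j → prices.getD k 0 ≤ prices.getD j' 0) ∧
    ans.getD k 0 = (j : Int) - (k : Int)

-- loop invariant after processing indices 0..i-1
def pvInv (prices : List Int) (i : Nat) (st : List Nat) (ans : List Int) : Prop :=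
  ans.length = prices.length ∧
  List.Pairwise (· > ·) st ∧
  (∀ k ∈ st, k < i ∧ ∀ j, k < j → j < i → prices.getD k 0 ≤ prices.getD j 0) ∧
  (∀ k, k < i → k ∉ st → pvDone prices ans i k)

lemma getD_set_ne (l : List Int) (m k : Nat) (v : Int) (h : m ≠ k) :
    (l.set m v).getD k 0 = l.getD k 0 := by
  simp [List.getD, List.getElem?_set_ne h]

lemma getD_set_self (l : List Int) (m : Nat) (v : Int) (h : m < l.length) :
    (l.set m v).getD m 0 = v := by
  simp [List.getD, h]

lemma pvDone_mono (prices ans : List Int) (m m' k : Nat) (h : m ≤ m')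
    (hd : pvDone prices ans m k) : pvDone prices ans m' k := by
  obtain ⟨j, h1, h2, h3⟩ := hd
  exact ⟨j, h1, lt_of_lt_of_le h2 h, h3⟩

lemma pvDone_set_ne (prices ans : List Int) (m k p : Nat) (v : Int) (h : p ≠ k)
    (hd : pvDone prices ans m k) : pvDone prices (ans.set p v) m k := by
  obtain ⟨j, h1, h2, h3, h4, h5⟩ := hd
  exact ⟨j, h1, h2, h3, h4, by rw [getD_set_ne _ _ _ _ h]; exact h5⟩

lemma pvPopPhase_spec (prices : List Int) (i : Nat) (hi : i < prices.length) :
    ∀ st ans, ans.length = prices.length →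
      List.Pairwise (· > ·) st →
      (∀ k ∈ st, k < i ∧ ∀ j, k < j → j < i → prices.getD k 0 ≤ prices.getD j 0) →
      (∀ k, k < i → k ∉ st → pvDone prices ans (i + 1) k) →
      (pvPopPhase prices i st ans).2.length = prices.length ∧
      List.Pairwise (· > ·) (pvPopPhase prices i st ans).1 ∧
      (∀ k ∈ (pvPopPhase prices i st ans).1, k ∈ st ∧
        prices.getD k 0 ≤ prices.getD i 0) ∧
      (∀ k, k < i → k ∉ (pvPopPhase prices i st ans).1 →
        pvDone prices (pvPopPhase prices i st ans).2 (i + 1) k) := by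
  intro st
  induction st with
  | nil =>
      intro ans hlen hpw hb hc
      refine ⟨hlen, by simp [pvPopPhase], by simp [pvPopPhase], ?_⟩
      intro k hk hk2
      exact hc k hk (by simp)
  | cons past rest ih =>
      intro ans hlen hpw hb hc
      by_cases hcond : prices.getD past 0 > prices.getD i 0
      · -- pop
        have hpast := hb past (by simp)
        have hc' : ∀ k, k < i → k ∉ rest →
            pvDone prices (ans.set past ((i : Int) - (past : Int))) (i + 1) k := by
          intro k hk hk2
          by_cases hkp : k = past
          · subst hkp
            refine ⟨i, hpast.1, Nat.lt_succ_self i, hcond, hpast.2, ?_⟩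
            exact getD_set_self _ _ _ (by omega)
          · exact pvDone_set_ne prices ans (i+1) k past _ (fun h => hkp h.symm)
              (hc k hk (by simp only [List.mem_cons, not_or]; exact ⟨hkp, hk2⟩))
        obtain ⟨r1, r2, r3, r4⟩ := ih _ (by simp [hlen]) (List.pairwise_cons.mp hpw).2
          (fun k hk => hb k (by simp [hk])) hc'
        simp only [pvPopPhase]
        rw [if_pos hcond]
        exact ⟨r1, r2, fun k hk => ⟨List.mem_cons_of_mem _ (r3 k hk).1, (r3 k hk).2⟩, r4⟩
      · -- stop
        simp only [pvPopPhase, if_neg hcond]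
        refine ⟨hlen, hpw, ?_, ?_⟩
        · intro k hk
          rcases List.mem_cons.mp hk with h | h
          · subst h; exact ⟨by simp, le_of_not_gt hcond⟩
          · refine ⟨by simp [h], ?_⟩
            have hkpast : k < past := (List.pairwise_cons.mp hpw).1 k h
            have hkprop := hb k (by simp [h])
            have h1 : prices.getD k 0 ≤ prices.getD past 0 :=
              hkprop.2 past hkpast (hb past (by simp)).1
            exact le_trans h1 (le_of_not_gt hcond)
        · intro k hk hk2
          exact hc k hk hk2

lemma pvStep_inv (prices : List Int) (i : Nat) (hi : i < prices.length)
    (st : List Nat) (ans : List Int) (hinv : pvInv prices i st ans) :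
    pvInv prices (i + 1) (i :: (pvPopPhase prices i st ans).1)
      (pvPopPhase prices i st ans).2 := by
  obtain ⟨hl0, hp0, hb, hc0⟩ := hinv
  obtain ⟨hlen, hpw, hmem, hdone⟩ := pvPopPhase_spec prices i hi st ans hl0 hp0 hb
    (fun k hk hk2 => pvDone_mono prices ans i (i+1) k (Nat.le_succ i) (hc0 k hk hk2))
  refine ⟨hlen, ?_, ?_, ?_⟩
  · exact List.pairwise_cons.mpr ⟨fun k hk => (hb k (hmem k hk).1).1, hpw⟩
  · intro k hk
    rcases List.mem_cons.mp hk with h | h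
    · rw [h]; exact ⟨Nat.lt_succ_self i, fun j hj1 hj2 => absurd hj1 (by omega)⟩
    · have hkst := hmem k h
      have hkprop := hb k hkst.1
      refine ⟨by omega, ?_⟩
      intro j hj1 hj2
      by_cases hji : j = i
      · subst hji; exact hkst.2
      · exact hkprop.2 j hj1 (by omega)
  · intro k hk hk2
    have hki : k < i := by
      rcases Nat.lt_succ_iff_lt_or_eq.mp hk with h | h
      · exact h
      · exact absurd (h ▸ List.mem_cons_self) hk2
    exact hdone k hki (fun h => hk2 (List.mem_cons_of_mem _ h))

lemma pvMain_inv (prices : List Int) : ∀ i : Nat, i ≤ prices.length →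
    pvInv prices i
      ((List.range i).foldl
        (fun s j =>
          let r := pvPopPhase prices j s.1 s.2
          (j :: r.1, r.2))
        ([], List.replicate prices.length (0 : Int))).1
      ((List.range i).foldl
        (fun s j =>
          let r := pvPopPhase prices j s.1 s.2
          (j :: r.1, r.2))
        ([], List.replicate prices.length (0 : Int))).2 := by
  intro i
  induction i with
  | zero =>
      intro _
      refine ⟨by simp, by simp, by simp, ?_⟩
      intro k hk; omega
  | succ n ih =>
      intro hn
      rw [List.range_succ, List.foldl_append]
      exact pvStep_inv prices n (by omega) _ _ (ih (by omega))

-- the final flush loop, pointwise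
lemma pvFlush_getD (N : Int) : ∀ (l : List Nat) (ans : List Int),
    (∀ k ∈ l, k < ans.length) → ∀ k : Nat,
    (l.foldl (fun a k => a.set k (N - 1 - (k : Int))) ans).getD k 0 =
      if k ∈ l then N - 1 - (k : Int) else ans.getD k 0 := by
  intro l
  induction l with
  | nil => intro ans _ k; simp
  | cons h t ih =>
      intro ans hlt k
      simp only [List.foldl_cons]
      rw [ih _ (by intro x hx; simpa using hlt x (List.mem_cons_of_mem _ hx)) k]
      by_cases hkt : k ∈ t
      · simp [hkt]
      · by_cases hkh : k = h
        · subst hkh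
          have hkl := hlt k List.mem_cons_self
          simp [hkt, List.getD, hkl]
        · simp [hkt, hkh, List.getD,
            List.getElem?_set_ne (show h ≠ k from fun h' => hkh h'.symm)]

lemma pvFlush_length (N : Int) : ∀ (l : List Nat) (ans : List Int),
    (l.foldl (fun a k => a.set k (N - 1 - (k : Int))) ans).length = ans.length := by
  intro l
  induction l with
  | nil => intro ans; rfl
  | cons h t ih => intro ans; simp [List.foldl_cons, ih]

-- pvCnt when no element is strictly smaller than p
lemma pvCnt_no_drop (p : Int) : ∀ l : List Int, (∀ q ∈ l, p ≤ q) → pvCnt p l = l.length := by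
  intro l
  induction l with
  | nil => intro _; rfl
  | cons q rest ih =>
      intro h
      have hq : ¬ q < p := not_lt.mpr (h q (by simp))
      simp [pvCnt, hq, ih (fun x hx => h x (by simp [hx]))]
      omega

-- pvCnt when the first strictly smaller element sits at position m
lemma pvCnt_first_drop (p : Int) : ∀ (l : List Int) (m : Nat) (hm : m < l.length),
    l[m] < p → (∀ m' : Nat, m' < m → ∀ hm' : m' < l.length, p ≤ l[m']) →
    pvCnt p l = (m : Int) + 1 := by
  intro l
  induction l with
  | nil => intro m hm; simp at hm
  | cons q rest ih =>
      intro m hm hdrop hmin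
      cases m with
      | zero => simp at hdrop; simp [pvCnt, hdrop]
      | succ m' =>
          have hq : ¬ q < p := by
            have := hmin 0 (Nat.succ_pos m') (by simp)
            simpa using not_lt.mpr this
          have hrest := ih m' (by simpa using hm) (by simpa using hdrop)
            (fun m'' hm'' hlt => by
              have := hmin (m'' + 1) (by omega) (by simpa using hlt)
              simpa using this)
          simp [pvCnt, hq, hrest]
          ring

theorem solution_spec_aux (prices : List Int) :
    solution prices = solution_alt prices := by
  have hinv := pvMain_inv prices prices.length le_rfl
  set st := ((List.range prices.length).foldl
    (fun s j =>
      let r := pvPopPhase prices j s.1 s.2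
      (j :: r.1, r.2))
    ([], List.replicate prices.length (0 : Int))).1 with hst
  set ans := ((List.range prices.length).foldl
    (fun s j =>
      let r := pvPopPhase prices j s.1 s.2
      (j :: r.1, r.2))
    ([], List.replicate prices.length (0 : Int))).2 with hans
  obtain ⟨hlen, _, hb, hc⟩ := hinv
  have hsol : solution prices =
      st.reverse.foldl (fun a k => a.set k ((prices.length : Int) - 1 - (k : Int))) ans := rfl
  have hmemlt : ∀ k ∈ st.reverse, k < ans.length := by
    intro k hk
    rw [hlen]
    exact (hb k (List.mem_reverse.mp hk)).1
  apply List.ext_getElem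
  · rw [hsol, pvFlush_length, hlen]
    simp [solution_alt]
  · intro k hk1 hk2
    have hkn : k < prices.length := by
      simpa [solution_alt] using hk2
    have hlenA : (solution prices).length = prices.length := by
      rw [hsol, pvFlush_length]; exact hlen
    have hA : (solution prices)[k] = (solution prices).getD k 0 := by
      rw [List.getD_eq_getElem _ _ hk1]
    have hB : (solution_alt prices)[k]'hk2 =
        pvCnt (prices.getD k 0) (prices.drop (k + 1)) := by
      simp [solution_alt]
    rw [hA, hB, hsol, pvFlush_getD _ _ _ hmemlt k]
    by_cases hkst : k ∈ st
    · -- never drops: A writes n-1-k, B counts the whole suffix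
      simp only [List.mem_reverse, hkst, if_pos]
      have hnodrop : ∀ q ∈ prices.drop (k + 1), prices.getD k 0 ≤ q := by
        intro q hq
        obtain ⟨m, hm, hqeq⟩ := List.mem_iff_getElem.mp hq
        rw [List.getElem_drop] at hqeq
        have hjn : k + 1 + m < prices.length := by
          have h' := hm; rw [List.length_drop] at h'; omega
        have := (hb k hkst).2 (k + 1 + m) (by omega) hjn
        rw [List.getD_eq_getElem _ _ hjn] at this
        omega
      rw [pvCnt_no_drop _ _ hnodrop]
      simp [List.length_drop]
      omega
    · -- first drop at j: A wrote j - k, B counts j - k steps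
      simp only [List.mem_reverse, hkst, ite_false]
      obtain ⟨j, hj1, hj2, hj3, hj4, hj5⟩ := hc k hkn hkst
      rw [hj5]
      have hmlt : j - k - 1 < (prices.drop (k + 1)).length := by
        rw [List.length_drop]; omega
      have hdropj : (prices.drop (k + 1))[j - k - 1] < prices.getD k 0 := by
        rw [List.getElem_drop]
        have : k + 1 + (j - k - 1) = j := by omega
        rw [List.getD_eq_getElem _ _ (by omega : j < prices.length)] at hj3
        simpa [this] using hj3
      have hmin : ∀ m' : Nat, m' < j - k - 1 → ∀ hm' : m' < (prices.drop (k+1)).length,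
          prices.getD k 0 ≤ (prices.drop (k+1))[m'] := by
        intro m' hm' hlt
        rw [List.getElem_drop]
        have hjn : k + 1 + m' < prices.length := by
          have h' := hlt; rw [List.length_drop] at h'; omega
        have := hj4 (k + 1 + m') (by omega) (by omega)
        rw [List.getD_eq_getElem _ _ hjn] at this
        exact this
      rw [pvCnt_first_drop _ _ _ hmlt hdropj hmin]
      omega

-- ===== VERDICT (by name: the statement is the Claim_ definition above) =====
theorem solution_spec : Claim_equal_solution := by
  intro prices _
  exact solution_spec_aux prices
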